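-- pv_equiv track=rewrite | github.com/hanikasarfa94-max/Graphflow | scripts/demo/seed_wiki.py | _folder_for_page
-- ===== SOURCE A (Python) =====
-- def _folder_for_page(tags: list[str]) -> str:
--     """Phase 3.A — pick a default folder bucket per wiki page based on
--     its tags. Keeps the demo tree non-empty without hand-mapping every
--     page. Falls back to root when no tag matches.
--     """
--     lowered = {t.lower() for t in tags}
--     if any(t in lowered for t in ("design", "ux", "ui", "visual")):
--         return "design"
--     if any(
--         t in lowered for t in ("engineering", "eng", "backend", "api", "tech")
--     ):
--         return "engineering"
--     if any(t in lowered for t in ("lore", "story", "world", "narrative")):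
--         return "lore"
--     return ""
-- ===== SOURCE B (Python) =====
-- KEYWORD_TO_FOLDER = {
--     "design": "design", "ux": "design", "ui": "design", "visual": "design",
--     "engineering": "engineering", "eng": "engineering", "backend": "engineering",
--     "api": "engineering", "tech": "engineering",
--     "lore": "lore", "story": "lore", "world": "lore", "narrative": "lore",
-- }
--
-- FOLDER_PRIORITY = ["design", "engineering", "lore"]
--
--
-- def _folder_for_page(tags: list[str]) -> str:
--     matched = set()
--     for t in tags:
--         folder = KEYWORD_TO_FOLDER.get(t.lower())
--         if folder is not None:
--             matched.add(folder)
--     for folder in FOLDER_PRIORITY: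
--         if folder in matched:
--             return folder
--     return ""
-- ===== Notes on version B (the rewrite author's own statement) =====
-- stated objective: idiomatic
-- what changed: Replaces A's three any-scans of fixed keyword tuples against a set of lowered tags by a single pass over the tags through a keyword-to-folder dict that accumulates matched folder names, followed by a fixed-priority pick (design > engineering > lore).
import Mathlib
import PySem

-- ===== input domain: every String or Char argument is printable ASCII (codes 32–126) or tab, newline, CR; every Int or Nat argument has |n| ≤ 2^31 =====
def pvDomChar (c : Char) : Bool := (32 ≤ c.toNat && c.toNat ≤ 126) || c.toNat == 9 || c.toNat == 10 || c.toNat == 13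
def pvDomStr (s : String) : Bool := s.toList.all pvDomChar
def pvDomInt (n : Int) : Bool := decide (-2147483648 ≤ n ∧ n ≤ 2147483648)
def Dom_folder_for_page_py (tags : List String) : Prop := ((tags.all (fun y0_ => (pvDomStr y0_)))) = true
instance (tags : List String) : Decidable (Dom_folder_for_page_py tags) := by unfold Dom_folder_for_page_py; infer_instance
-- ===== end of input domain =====

-- B replaces A's three any-scans over fixed keyword tuples by one pass over the tags through a
-- keyword→folder dict, then a fixed-priority pick; objective: idiomatic, same exact result.

-- ===== PORT A =====
def folder_for_page_py (tags : List String) : String :=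
  let lowered : PySem.Set String := PySem.Set.ofList (tags.map PySem.Str.lower)
  if (["design", "ux", "ui", "visual"] : List String).any (fun t => PySem.Set.contains lowered t) then "design"
  else if (["engineering", "eng", "backend", "api", "tech"] : List String).any (fun t => PySem.Set.contains lowered t) then "engineering"
  else if (["lore", "story", "world", "narrative"] : List String).any (fun t => PySem.Set.contains lowered t) then "lore"
  else ""

-- ===== PORT B =====
def pvKeywordFolderPairs : List (String × String) :=
  [("design","design"),("ux","design"),("ui","design"),("visual","design"),
   ("engineering","engineering"),("eng","engineering"),("backend","engineering"),("api","engineering"),("tech","engineering"),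
   ("lore","lore"),("story","lore"),("world","lore"),("narrative","lore")]

def pvKeywordToFolder : PySem.Dict String String := PySem.Dict.ofList pvKeywordFolderPairs

def pvFolderPriority : List String := ["design", "engineering", "lore"]

def folder_for_page_py_alt (tags : List String) : String :=
  let matched : PySem.Set String := tags.foldl (fun s t =>
      match pvKeywordToFolder.get? (PySem.Str.lower t) with
      | some f => PySem.Set.add s f
      | none => s) PySem.Set.empty
  ((pvFolderPriority.find? (fun f => PySem.Set.contains matched f)).getD "")

-- ===== PRECONDITION & SPEC =====
def Spec_folder_for_page_py (tags : List String) (out : String) : Prop := out = folder_for_page_py_alt tags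
instance (tags : List String) (out : String) : Decidable (Spec_folder_for_page_py tags out) := by unfold Spec_folder_for_page_py; infer_instance

-- ===== CLAIM (what is proved, stated in full; the proofs are below) =====
def Claim_equal_folder_for_page_py : Prop := ∀ (tags : List String), Dom_folder_for_page_py tags → Spec_folder_for_page_py tags (folder_for_page_py tags)

-- ===== LEMMAS AND PROOFS =====

-- the per-folder "some tag lowers to a keyword of this bucket" test, shared shape of both proofs
def pvHits (kws : List String) (tags : List String) : Bool :=
  tags.any (fun t => decide (PySem.Str.lower t ∈ kws))

def pvPick (d e l : Bool) : String :=
  if d then "design" else if e then "engineering" else if l then "lore" else ""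

set_option maxHeartbeats 1000000 in
theorem pvKT_eq : pvKeywordToFolder = PySem.Dict.mk pvKeywordFolderPairs := by decide

theorem pvKT_items : pvKeywordToFolder.items = pvKeywordFolderPairs := by rw [pvKT_eq]

theorem pvKT_mem (s v : String) (h : pvKeywordToFolder.get? s = some v) :
    (s, v) ∈ pvKeywordFolderPairs := by
  have := PySem.Dict.mem_items_of_get?_eq_some pvKeywordToFolder h
  rwa [pvKT_items] at this

theorem pvKT_design (s : String) :
    pvKeywordToFolder.get? s = some "design" ↔ s ∈ (["design", "ux", "ui", "visual"] : List String) := by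
  constructor
  · intro h
    have := pvKT_mem s _ h
    simp [pvKeywordFolderPairs, Prod.ext_iff] at this
    simp
    tauto
  · intro h
    rw [pvKT_eq]
    simp at h
    rcases h with h | h | h | h <;> subst h <;> rfl

theorem pvKT_eng (s : String) :
    pvKeywordToFolder.get? s = some "engineering" ↔ s ∈ (["engineering", "eng", "backend", "api", "tech"] : List String) := by
  constructor
  · intro h
    have := pvKT_mem s _ h
    simp [pvKeywordFolderPairs, Prod.ext_iff] at this
    simp
    tauto
  · intro h
    rw [pvKT_eq]
    simp at h
    rcases h with h | h | h | h | h <;> subst h <;> rfl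

theorem pvKT_lore (s : String) :
    pvKeywordToFolder.get? s = some "lore" ↔ s ∈ (["lore", "story", "world", "narrative"] : List String) := by
  constructor
  · intro h
    have := pvKT_mem s _ h
    simp [pvKeywordFolderPairs, Prod.ext_iff] at this
    simp
    tauto
  · intro h
    rw [pvKT_eq]
    simp at h
    rcases h with h | h | h | h <;> subst h <;> rfl

-- A's any-over-keywords test equals pvHits
theorem pvA_cond (kws tags : List String) :
    kws.any (fun t => PySem.Set.contains (PySem.Set.ofList (tags.map PySem.Str.lower)) t) = pvHits kws tags := by
  rw [Bool.eq_iff_iff]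
  simp only [pvHits, List.any_eq_true, PySem.Set.contains_iff,
    PySem.Set.mem_ofList, List.mem_map, decide_eq_true_eq]
  constructor
  · rintro ⟨k, hk, t, ht, rfl⟩; exact ⟨t, ht, hk⟩
  · rintro ⟨t, ht, hk⟩; exact ⟨_, hk, t, ht, rfl⟩

-- membership in B's accumulated folder set
theorem pvMatched_mem (tags : List String) (s : PySem.Set String) (y : String) :
    y ∈ tags.foldl (fun s t =>
        match pvKeywordToFolder.get? (PySem.Str.lower t) with
        | some f => PySem.Set.add s f
        | none => s) s ↔
      y ∈ s ∨ ∃ t ∈ tags, pvKeywordToFolder.get? (PySem.Str.lower t) = some y := by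
  induction tags generalizing s with
  | nil => simp
  | cons t ts ih =>
    simp only [List.foldl_cons, ih, List.mem_cons]
    cases h : pvKeywordToFolder.get? (PySem.Str.lower t) with
    | none =>
      constructor
      · rintro (hy | hy)
        · exact Or.inl hy
        · obtain ⟨u, hu, hg⟩ := hy; exact Or.inr ⟨u, Or.inr hu, hg⟩
      · rintro (hy | ⟨u, hu, hg⟩)
        · exact Or.inl hy
        · rcases hu with rfl | hu
          · rw [h] at hg; cases hg
          · exact Or.inr ⟨u, hu, hg⟩
    | some f =>
      rw [PySem.Set.mem_add]
      constructor
      · rintro ((hy | rfl) | hy)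
        · exact Or.inl hy
        · exact Or.inr ⟨t, Or.inl rfl, h⟩
        · obtain ⟨u, hu, hg⟩ := hy; exact Or.inr ⟨u, Or.inr hu, hg⟩
      · rintro (hy | ⟨u, hu, hg⟩)
        · exact Or.inl (Or.inl hy)
        · rcases hu with rfl | hu
          · rw [h] at hg; injection hg with hg; exact Or.inl (Or.inr hg.symm)
          · exact Or.inr ⟨u, hu, hg⟩

theorem pvB_cond (tags : List String) (kws : List String) (f : String)
    (hf : ∀ s, pvKeywordToFolder.get? s = some f ↔ s ∈ kws) :
    PySem.Set.contains (tags.foldl (fun s t =>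
        match pvKeywordToFolder.get? (PySem.Str.lower t) with
        | some g => PySem.Set.add s g
        | none => s) PySem.Set.empty) f = pvHits kws tags := by
  rw [Bool.eq_iff_iff]
  simp only [PySem.Set.contains_iff, pvMatched_mem, pvHits,
    List.any_eq_true, decide_eq_true_eq]
  constructor
  · rintro (hy | ⟨t, ht, hg⟩)
    · cases hy
    · exact ⟨t, ht, (hf _).mp hg⟩
  · rintro ⟨t, ht, hk⟩
    exact Or.inr ⟨t, ht, (hf _).mpr hk⟩

theorem pvA_pick (tags : List String) :
    folder_for_page_py tags =
      pvPick (pvHits ["design", "ux", "ui", "visual"] tags)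
             (pvHits ["engineering", "eng", "backend", "api", "tech"] tags)
             (pvHits ["lore", "story", "world", "narrative"] tags) := by
  simp only [folder_for_page_py, pvPick, pvA_cond]

theorem pvB_pick (tags : List String) :
    folder_for_page_py_alt tags =
      pvPick (pvHits ["design", "ux", "ui", "visual"] tags)
             (pvHits ["engineering", "eng", "backend", "api", "tech"] tags)
             (pvHits ["lore", "story", "world", "narrative"] tags) := by
  simp only [folder_for_page_py_alt, pvFolderPriority]
  rw [show (fun f => PySem.Set.contains (tags.foldl (fun s t =>
      match pvKeywordToFolder.get? (PySem.Str.lower t) with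
      | some f => PySem.Set.add s f
      | none => s) PySem.Set.empty) f) = fun f => PySem.Set.contains (tags.foldl (fun s t =>
      match pvKeywordToFolder.get? (PySem.Str.lower t) with
      | some g => PySem.Set.add s g
      | none => s) PySem.Set.empty) f from rfl]
  rw [List.find?]
  rw [pvB_cond tags _ _ pvKT_design]
  cases hd : pvHits ["design", "ux", "ui", "visual"] tags with
  | true => simp [pvPick]
  | false =>
    simp only [List.find?]
    rw [pvB_cond tags _ _ pvKT_eng]
    cases he : pvHits ["engineering", "eng", "backend", "api", "tech"] tags with
    | true => simp [pvPick]
    | false =>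
      rw [pvB_cond tags _ _ pvKT_lore]
      cases hl : pvHits ["lore", "story", "world", "narrative"] tags with
      | true => simp [pvPick]
      | false => simp [pvPick]

-- ===== VERDICT (by name: the statement is the Claim_ definition above) =====
theorem folder_for_page_py_spec : Claim_equal_folder_for_page_py := by
  intro tags _
  unfold Spec_folder_for_page_py
  rw [pvA_pick, pvB_pick]
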